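-- pv_equiv track=rewrite | github.com/BrianSP38/Parcial-1-Lenguajes-Lenguajes-de-Programaci-n | Punto 1.py | afd_abc
-- ===== SOURCE A (Python) =====
-- def afd_abc(cadena):
--     estado = 0
--     for simbolo in cadena:
--         if estado == 0:
--             if simbolo == 'a':
--                 estado = 0
--             elif simbolo == 'b':
--                 estado = 1
--             elif simbolo == 'c':
--                 estado = 2
--             else:
--                 return False
--         elif estado == 1:
--             if simbolo == 'b':
--                 estado = 1
--             elif simbolo == 'c':
--                 estado = 2
--             else:
--                 return False
--         elif estado == 2:
--             if simbolo == 'c':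
--                 estado = 2
--             else:
--                 return False
--     return True
-- ===== SOURCE B (Python) =====
-- def afd_abc(cadena):
--     # a*b*c* over {a,b,c} = every char in {a,b,c} and the string is non-decreasing
--     return all(c in {'a', 'b', 'c'} for c in cadena) and \
--         all(x <= y for x, y in zip(cadena, cadena[1:]))
-- ===== Notes on version B (the rewrite author's own statement) =====
-- stated objective: idiomatic
-- what changed: Replaces the hand-written 3-state DFA loop with the order characterization: a*b*c* holds iff every character is in {'a','b','c'} and adjacent characters are non-decreasing.
import Mathlib
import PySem

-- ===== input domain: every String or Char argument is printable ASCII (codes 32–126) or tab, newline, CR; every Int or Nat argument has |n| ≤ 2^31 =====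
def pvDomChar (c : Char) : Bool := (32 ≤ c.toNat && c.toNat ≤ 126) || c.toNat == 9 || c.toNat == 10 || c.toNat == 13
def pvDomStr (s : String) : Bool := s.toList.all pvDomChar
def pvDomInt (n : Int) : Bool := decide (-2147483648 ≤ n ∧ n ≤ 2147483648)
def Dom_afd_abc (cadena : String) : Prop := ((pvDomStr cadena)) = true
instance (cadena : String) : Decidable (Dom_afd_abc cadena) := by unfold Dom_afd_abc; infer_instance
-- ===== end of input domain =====

-- B replaces the 3-state DFA scan with the order characterization: all chars in {'a','b','c'} and adjacent chars non-decreasing (idiomatic, same cost).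


-- ===== PORT A =====
-- the for-loop with early return, as structural recursion over the characters with the DFA state
def afdLoop (estado : Int) (l : List Char) : Bool :=
  match l with
  | [] => true
  | simbolo :: rest =>
    if estado == 0 then
      if simbolo == 'a' then afdLoop 0 rest
      else if simbolo == 'b' then afdLoop 1 rest
      else if simbolo == 'c' then afdLoop 2 rest
      else false
    else if estado == 1 then
      if simbolo == 'b' then afdLoop 1 rest
      else if simbolo == 'c' then afdLoop 2 rest
      else false
    else if estado == 2 then
      if simbolo == 'c' then afdLoop 2 rest
      else false
    else afdLoop estado rest

def afd_abc (cadena : String) : Bool := afdLoop 0 cadena.toList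

-- ===== PORT B =====
def afd_abc_alt (cadena : String) : Bool :=
  (cadena.toList.all (fun c => c == 'a' || c == 'b' || c == 'c')) &&
  ((cadena.toList.zip cadena.toList.tail).all (fun p => decide (p.1 ≤ p.2)))

-- ===== PRECONDITION & SPEC =====
def Spec_afd_abc (cadena : String) (out : Bool) : Prop := out = afd_abc_alt cadena
instance (cadena : String) (out : Bool) : Decidable (Spec_afd_abc cadena out) := by unfold Spec_afd_abc; infer_instance

-- ===== CLAIM (what is proved, stated in full; the proofs are below) =====
def Claim_equal_afd_abc : Prop := ∀ (cadena : String), Dom_afd_abc cadena → Spec_afd_abc cadena (afd_abc cadena)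

-- ===== LEMMAS AND PROOFS =====

def isabc (c : Char) : Bool := c == 'a' || c == 'b' || c == 'c'

def chainZ (l : List Char) : Bool := (l.zip l.tail).all (fun p => decide (p.1 ≤ p.2))

def chOf (st : Int) : Char := if st = 0 then 'a' else if st = 1 then 'b' else 'c'

lemma chainZ_cons (x : Char) (l : List Char) :
    chainZ (x :: l) = ((l.head?.all (fun y => decide (x ≤ y))) && chainZ l) := by
  cases l with
  | nil => rfl
  | cons y r => simp [chainZ, List.zip]

lemma afdLoop_char (l : List Char) : ∀ st : Int, (st = 0 ∨ st = 1 ∨ st = 2) →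
    afdLoop st l = (l.all isabc && chainZ (chOf st :: l)) := by
  induction l with
  | nil => intro st _; simp [afdLoop, chainZ]
  | cons s r ih =>
    intro st hst
    rcases hst with h0 | h1 | h2 <;> subst_vars <;>
      by_cases ha : s = 'a' <;> by_cases hb : s = 'b' <;> by_cases hc : s = 'c' <;>
      simp_all [afdLoop, chOf, chainZ_cons, isabc, ih 0 (by omega), ih 1 (by omega),
        ih 2 (by omega)]

theorem afd_abc_spec : Claim_equal_afd_abc := by
  intro cadena _
  unfold Spec_afd_abc afd_abc afd_abc_alt
  have h := afdLoop_char cadena.toList 0 (Or.inl rfl)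
  rw [h, chainZ_cons]
  show (cadena.toList.all isabc && _) = (cadena.toList.all isabc && chainZ cadena.toList)
  cases hall : cadena.toList.all isabc with
  | false => simp
  | true =>
    simp only [Bool.true_and]
    have hhd : cadena.toList.head?.all (fun y => decide (chOf 0 ≤ y)) = true := by
      cases hl : cadena.toList with
      | nil => rfl
      | cons y t =>
        have hy : y = 'a' ∨ y = 'b' ∨ y = 'c' := by
          have := List.all_eq_true.mp (hl ▸ hall) y (by simp)
          simp [isabc] at this; tauto
        have hle : chOf 0 ≤ y := by
          rcases hy with h' | h' | h' <;> subst h' <;> decide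
        simp [hle]
    rw [hhd]
    simp
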